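-- pv_equiv track=rewrite | github.com/SheldonHH/algorithm-journey | src/class071/C6_DeleteOneNumberLengthKMaxSum.py | max_sum2
-- ===== SOURCE A (Python) =====
-- def max_sum2(nums, k):
--     n = len(nums)
--     if n <= k:
--         return 0
--     window = []
--     sum = 0
--     ans = float('-inf')
--     for i in range(n):
--         while window and nums[window[-1]] >= nums[i]:
--             window.pop()
--         window.append(i)
--         sum += nums[i]
--         if i >= k:
--             ans = max(ans, sum - nums[window[0]])
--             if window[0] == i - k:
--                 window.pop(0)
--             sum -= nums[i - k]
--     return ans
-- ===== SOURCE B (Python) =====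
-- def max_sum2(nums, k):
--     n = len(nums)
--     if n <= k:
--         return 0
--     pre = [0]
--     for v in nums:
--         pre.append(pre[-1] + v)
--     best = None
--     for j in range(k, n):
--         cur = pre[j + 1] - pre[j - k] - min(nums[j - k:j + 1])
--         if best is None or cur > best:
--             best = cur
--     return best
-- ===== Notes on version B (the rewrite author's own statement) =====
-- stated objective: alternative
-- what changed: Replaces the monotonic-deque sliding-minimum with a prefix-sum table plus a direct per-window min() over each (k+1)-slice, folded into a running maximum.
-- outside the precondition, e.g. on max_sum2([], -1): A returns -inf, B raises ValueError; on max_sum2([5], -1): A raises IndexError, B raises ValueError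
import Mathlib
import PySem

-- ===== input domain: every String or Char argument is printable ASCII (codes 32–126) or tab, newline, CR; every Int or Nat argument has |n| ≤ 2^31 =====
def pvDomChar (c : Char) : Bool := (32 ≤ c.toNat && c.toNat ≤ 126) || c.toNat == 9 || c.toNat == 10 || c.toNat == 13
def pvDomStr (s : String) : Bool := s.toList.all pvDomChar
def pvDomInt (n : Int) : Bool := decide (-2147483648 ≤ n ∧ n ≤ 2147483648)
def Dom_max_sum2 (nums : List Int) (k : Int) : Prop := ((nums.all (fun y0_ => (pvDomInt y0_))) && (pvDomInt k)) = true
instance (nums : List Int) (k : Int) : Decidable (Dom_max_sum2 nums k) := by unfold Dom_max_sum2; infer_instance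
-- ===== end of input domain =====

-- B replaces A's monotonic deque by a prefix-sum table and a per-window min() (alternative
-- decomposition, not faster). Pre_ restricts to k ≥ 0: for k < 0 A raises IndexError (nums[i-k]
-- past the end) or, on empty nums, returns the float -inf, not an int.

-- pyAt nums i = nums[i] (in-range at every use inside Pre_; IndexError cannot occur there)
def pyAt (nums : List Int) (i : Int) : Int := (PySem.List.pyGet? nums i).getD 0

-- ===== PORT A =====
-- the while-pop loop, acting on the REVERSED window (head = Python's window[-1])
def popLoop (nums : List Int) (x : Int) : List Int → List Int
  | [] => []
  | j :: rest => if pyAt nums j ≥ x then popLoop nums x rest else j :: rest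

-- max(ans, v) where ans starts as float('-inf') (modelled as none)
def maxUpd (ans : Option Int) (v : Int) : Option Int :=
  some (match ans with | none => v | some a => max a v)

def max_sum2 (nums : List Int) (k : Int) : Int :=
  let n : Int := nums.length
  if n ≤ k then 0
  else
    let st := (PySem.List.pyRange 0 n 1).foldl
      (fun (st : List Int × Int × Option Int) (i : Int) =>
        let window := st.1
        let sum := st.2.1
        let ans := st.2.2
        -- while window and nums[window[-1]] >= nums[i]: window.pop()
        let window := (popLoop nums (pyAt nums i) window.reverse).reverse
        let window := window ++ [i]            -- window.append(i)
        let sum := sum + pyAt nums i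
        if i ≥ k then
          let ans := maxUpd ans (sum - pyAt nums (window.headD 0))
          let window := if window.headD 0 = i - k then window.tail else window  -- window.pop(0)
          let sum := sum - pyAt nums (i - k)
          (window, sum, ans)
        else (window, sum, ans))
      ([], 0, none)
    st.2.2.getD 0   -- the float('-inf') return is unreachable under Pre_ (k ≥ 0 ∧ n > k)

-- ===== PORT B =====
def max_sum2_alt (nums : List Int) (k : Int) : Int :=
  let n : Int := nums.length
  if n ≤ k then 0
  else
    -- pre = [0]; for v in nums: pre.append(pre[-1] + v)
    let pre := nums.foldl (fun acc v => acc ++ [pyAt acc (-1) + v]) [0]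
    -- best = None; for j in range(k, n): …
    let best := (PySem.List.pyRange k n 1).foldl
      (fun (best : Option Int) (j : Int) =>
        let cur := pyAt pre (j + 1) - pyAt pre (j - k) -
          (PySem.List.min? (PySem.List.slice nums (some (j - k)) (some (j + 1))) (fun x => x)).getD 0
        match best with
        | none => some cur
        | some b => if cur > b then some cur else some b)
      none
    best.getD 0   -- best = None is unreachable here (the loop runs since k < n)

-- ===== PRECONDITION & SPEC =====
-- Pre_ excludes exactly k < 0: there A raises IndexError at nums[i-k] whenever nums ≠ [],
-- and on nums = [] returns float('-inf'), which is not an int.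
def Pre_max_sum2 (nums : List Int) (k : Int) : Prop := 0 ≤ k
instance (nums : List Int) (k : Int) : Decidable (Pre_max_sum2 nums k) := by unfold Pre_max_sum2; infer_instance
def pvWitness_max_sum2 : List Int × Int := ([3, -1, 4, 1, -5], 2)

def Spec_max_sum2 (nums : List Int) (k : Int) (out : Int) : Prop := out = max_sum2_alt nums k
instance (nums : List Int) (k : Int) (out : Int) : Decidable (Spec_max_sum2 nums k out) := by unfold Spec_max_sum2; infer_instance

-- ===== CLAIM (what is proved, stated in full; the proofs are below) =====
def Claim_equal_max_sum2 : Prop := ∀ (nums : List Int) (k : Int), Dom_max_sum2 nums k → Pre_max_sum2 nums k → Spec_max_sum2 nums k (max_sum2 nums k)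

-- ===== LEMMAS AND PROOFS =====

-- reference values: sum and min over the index window [a, b)
def sumR (nums : List Int) (a b : Int) : Int := ((PySem.List.pyRange a b 1).map (pyAt nums)).sum
def minv (nums : List Int) (a b : Int) : Int :=
  (PySem.List.min? (PySem.List.slice nums (some a) (some b)) (fun x => x)).getD 0
def fval (nums : List Int) (k j : Int) : Int := sumR nums (j - k) (j + 1) - minv nums (j - k) (j + 1)
def bestTo (nums : List Int) (k m : Int) : Option Int :=
  (PySem.List.pyRange k m 1).foldl (fun b j => maxUpd b (fval nums k j)) none

-- A's loop body, named for the proofs (definitionally the port's lambda)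
def stepA (nums : List Int) (k : Int) (st : List Int × Int × Option Int) (i : Int) :
    List Int × Int × Option Int :=
  let window := st.1
  let sum := st.2.1
  let ans := st.2.2
  let window := (popLoop nums (pyAt nums i) window.reverse).reverse
  let window := window ++ [i]
  let sum := sum + pyAt nums i
  if i ≥ k then
    let ans := maxUpd ans (sum - pyAt nums (window.headD 0))
    let window := if window.headD 0 = i - k then window.tail else window
    let sum := sum - pyAt nums (i - k)
    (window, sum, ans)
  else (window, sum, ans)

theorem max_sum2_eq (nums : List Int) (k : Int) :
    max_sum2 nums k = if (nums.length : Int) ≤ k then 0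
      else ((PySem.List.pyRange 0 (nums.length : Int) 1).foldl (stepA nums k) ([], 0, none)).2.2.getD 0 := rfl

theorem popLoop_eq (nums : List Int) (x : Int) (l : List Int) :
    popLoop nums x l = l.dropWhile (fun j => decide (pyAt nums j ≥ x)) := by
  induction l with
  | nil => rfl
  | cons j rest ih =>
    simp only [popLoop, List.dropWhile_cons]
    by_cases h : pyAt nums j ≥ x <;> simp [h, ih]

theorem slice_eq_map (nums : List Int) (a b : Int) (ha : 0 ≤ a) (hb : 0 ≤ b)
    (hbn : b ≤ (nums.length : Int)) :
    PySem.List.slice nums (some a) (some b) = (PySem.List.pyRange a b 1).map (pyAt nums) := by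
  have key : ∀ (d : Nat) (a : Int), 0 ≤ a → b - a ≤ (d : Int) →
      PySem.List.slice nums (some a) (some b) = (PySem.List.pyRange a b 1).map (pyAt nums) := by
    intro d
    induction d with
    | zero =>
      intro a ha0 hd
      rw [PySem.List.slice_toNat nums ha0 hb, PySem.List.pyRange_one_eq_nil (by omega)]
      have : b.toNat - a.toNat = 0 := by omega
      simp [this]
    | succ d ih =>
      intro a ha0 hd
      rcases le_or_gt b a with hba | hab'
      · rw [PySem.List.slice_toNat nums ha0 hb, PySem.List.pyRange_one_eq_nil hba]
        have : b.toNat - a.toNat = 0 := by omega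
        simp [this]
      · have hal : a.toNat < nums.length := by omega
        have hcons : PySem.List.slice nums (some a) (some b)
            = nums[a.toNat] :: PySem.List.slice nums (some (a + 1)) (some b) := by
          rw [PySem.List.slice_toNat nums ha0 hb, PySem.List.slice_toNat nums (by omega) hb]
          rw [← List.getElem_cons_drop hal]
          have h1 : b.toNat - a.toNat = (b.toNat - (a + 1).toNat) + 1 := by omega
          have h2 : (a + 1).toNat = a.toNat + 1 := by omega
          rw [h1, h2, List.take_succ_cons]
        rw [hcons, PySem.List.pyRange_one_cons hab', List.map_cons,
            ih (a + 1) (by omega) (by omega)]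
        congr 1
        simp [pyAt, PySem.List.pyGet?_of_nonneg nums ha0, List.getElem?_eq_getElem hal]
  exact key (b - a).toNat a ha (by omega)

theorem sumR_succ (nums : List Int) (a b : Int) (h : a ≤ b) :
    sumR nums a (b + 1) = sumR nums a b + pyAt nums b := by
  unfold sumR
  rw [PySem.List.pyRange_one_append a b (b + 1) h (by omega),
      PySem.List.pyRange_one_cons (by omega : b < b + 1),
      PySem.List.pyRange_one_eq_nil (by omega : b + 1 ≤ b + 1)]
  simp

theorem sumR_cons (nums : List Int) (a b : Int) (h : a < b) :
    sumR nums a b = pyAt nums a + sumR nums (a + 1) b := by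
  unfold sumR
  rw [PySem.List.pyRange_one_cons h]
  simp

theorem sumR_split (nums : List Int) (a m b : Int) (h1 : a ≤ m) (h2 : m ≤ b) :
    sumR nums a b = sumR nums a m + sumR nums m b := by
  unfold sumR
  rw [PySem.List.pyRange_one_append a m b h1 h2]
  simp

def Rwin (nums : List Int) (a b : Int) : Prop := a < b ∧ pyAt nums a < pyAt nums b

-- loop invariant for A
def loA (k m : Int) : Int := max 0 (m - k)
def InvA (nums : List Int) (k m : Int) (st : List Int × Int × Option Int) : Prop :=
  (∀ w ∈ st.1, loA k m ≤ w ∧ w < m) ∧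
  st.1.Pairwise (Rwin nums) ∧
  (∀ j : Int, loA k m ≤ j → j < m → ∃ w ∈ st.1, j ≤ w ∧ pyAt nums w ≤ pyAt nums j) ∧
  st.2.1 = sumR nums (loA k m) m ∧
  st.2.2 = bestTo nums k m

theorem head_min (nums : List Int) (lo hi hd : Int) (tl : List Int)
    (hb : ∀ w ∈ hd :: tl, lo ≤ w ∧ w ≤ hi)
    (hp : (hd :: tl).Pairwise (Rwin nums))
    (hc : ∀ j : Int, lo ≤ j → j ≤ hi → ∃ w ∈ hd :: tl, j ≤ w ∧ pyAt nums w ≤ pyAt nums j)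
    (hlo : 0 ≤ lo) (hhi : hi < (nums.length : Int)) :
    pyAt nums hd = minv nums lo (hi + 1) := by
  have hhdmin : ∀ w ∈ hd :: tl, pyAt nums hd ≤ pyAt nums w := by
    intro w hw
    rcases List.mem_cons.mp hw with h | h
    · subst h; exact le_refl _
    · exact le_of_lt ((List.pairwise_cons.mp hp).1 w h).2
  have hrange : ∀ j : Int, lo ≤ j → j ≤ hi → pyAt nums hd ≤ pyAt nums j := by
    intro j h1 h2
    obtain ⟨w, hw, _, hwv⟩ := hc j h1 h2
    exact le_trans (hhdmin w hw) hwv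
  have hsl := slice_eq_map nums lo (hi + 1) hlo (by have := hb hd (by simp); omega) (by omega)
  have hhd : lo ≤ hd ∧ hd ≤ hi := hb hd (by simp)
  have hmemhd : pyAt nums hd ∈ PySem.List.slice nums (some lo) (some (hi + 1)) := by
    rw [hsl]
    exact List.mem_map_of_mem (PySem.List.mem_pyRange_one.mpr (by omega))
  cases hmin : PySem.List.min? (PySem.List.slice nums (some lo) (some (hi + 1))) (fun x => x) with
  | none =>
    rw [PySem.List.min?_eq_none_iff] at hmin
    rw [hmin] at hmemhd; simp at hmemhd
  | some mv =>
    have hmv1 : mv ∈ PySem.List.slice nums (some lo) (some (hi + 1)) := PySem.List.min?_mem hmin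
    have hmv2 : mv ≤ pyAt nums hd := PySem.List.min?_isMin hmin _ hmemhd
    rw [hsl] at hmv1
    obtain ⟨j, hj, hjv⟩ := List.mem_map.mp hmv1
    have hjr := PySem.List.mem_pyRange_one.mp hj
    have : pyAt nums hd ≤ mv := hjv ▸ hrange j hjr.1 (by omega)
    simp [minv, hmin]; omega


theorem pop_inv (nums : List Int) (lo hi hd : Int) (tl : List Int)
    (hb : ∀ w ∈ hd :: tl, lo ≤ w ∧ w ≤ hi)
    (hp : (hd :: tl).Pairwise (Rwin nums))
    (hc : ∀ j : Int, lo ≤ j → j ≤ hi → ∃ w ∈ hd :: tl, j ≤ w ∧ pyAt nums w ≤ pyAt nums j) :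
    (∀ w ∈ (if hd = lo then tl else hd :: tl), lo + 1 ≤ w ∧ w ≤ hi) ∧
    (if hd = lo then tl else hd :: tl).Pairwise (Rwin nums) ∧
    (∀ j : Int, lo + 1 ≤ j → j ≤ hi →
      ∃ w ∈ (if hd = lo then tl else hd :: tl), j ≤ w ∧ pyAt nums w ≤ pyAt nums j) := by
  obtain ⟨htl, hptl⟩ := List.pairwise_cons.mp hp
  by_cases hcase : hd = lo
  · rw [if_pos hcase]
    refine ⟨?_, hptl, ?_⟩
    · intro w hw
      have h1 := hb w (List.mem_cons_of_mem _ hw)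
      have h2 := (htl w hw).1
      omega
    · intro j h1 h2
      obtain ⟨w, hw, hjw, hwv⟩ := hc j (by omega) h2
      rcases List.mem_cons.mp hw with h | h
      · subst h; omega
      · exact ⟨w, h, hjw, hwv⟩
  · rw [if_neg hcase]
    refine ⟨?_, hp, ?_⟩
    · intro w hw
      rcases List.mem_cons.mp hw with h | h
      · have := hb hd (by simp); subst h; omega
      · have h1 := hb w (List.mem_cons_of_mem _ h)
        have h2 := (htl w h).1
        have h3 := hb hd (by simp)
        omega
    · intro j h1 h2
      obtain ⟨w, hw, hjw, hwv⟩ := hc j (by omega) h2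
      exact ⟨w, hw, hjw, hwv⟩

theorem invA_zero (nums : List Int) (k : Int) (hk : 0 ≤ k) :
    InvA nums k 0 ([], 0, none) := by
  refine ⟨by simp, by simp, ?_, ?_, ?_⟩
  · intro j h1 h2; simp [loA] at h1; omega
  · simp [loA, sumR, PySem.List.pyRange_one_eq_nil]
  · simp [bestTo, PySem.List.pyRange_one_eq_nil (by omega : (0:Int) ≤ k)]

theorem bestTo_succ (nums : List Int) (k m : Int) (hkm : k ≤ m) :
    bestTo nums k (m + 1) = maxUpd (bestTo nums k m) (fval nums k m) := by
  unfold bestTo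
  rw [PySem.List.pyRange_one_append k m (m + 1) hkm (by omega),
      PySem.List.pyRange_one_cons (by omega : m < m + 1),
      PySem.List.pyRange_one_eq_nil (le_refl (m + 1))]
  simp [List.foldl_append]

theorem bestTo_stop (nums : List Int) (k m : Int) (h : m + 1 ≤ k) :
    bestTo nums k (m + 1) = bestTo nums k m := by
  unfold bestTo
  rw [PySem.List.pyRange_one_eq_nil h, PySem.List.pyRange_one_eq_nil (by omega)]

theorem invA_step (nums : List Int) (k m : Int) (hk : 0 ≤ k) (hm : 0 ≤ m)
    (hmn : m < (nums.length : Int)) (st : List Int × Int × Option Int)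
    (hI : InvA nums k m st) : InvA nums k (m + 1) (stepA nums k st m) := by
  obtain ⟨hmem, hpw, hcov, hsum, hans⟩ := hI
  simp only [stepA]
  set x := pyAt nums m with hxdef
  set p : Int → Bool := fun j => decide (pyAt nums j ≥ x) with hpdef
  have hpop : popLoop nums x st.1.reverse = st.1.reverse.dropWhile p := popLoop_eq nums x _
  rw [hpop]
  set w1 := (st.1.reverse.dropWhile p).reverse with hw1
  have hdec : st.1 = w1 ++ (st.1.reverse.takeWhile p).reverse := by
    conv_lhs => rw [← List.reverse_reverse st.1,
      ← List.takeWhile_append_dropWhile (p := p) (l := st.1.reverse)]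
    rw [List.reverse_append]
  have hsub : w1.Sublist st.1 := by
    rw [hdec]; exact List.sublist_append_left _ _
  have hmem1 : ∀ w ∈ w1, loA k m ≤ w ∧ w < m := fun w hw => hmem w (hsub.mem hw)
  have hpw1 : w1.Pairwise (Rwin nums) := hpw.sublist hsub
  have hpopped : ∀ w ∈ (st.1.reverse.takeWhile p).reverse, x ≤ pyAt nums w := by
    intro w hw
    have := List.mem_takeWhile_imp (List.mem_reverse.mp hw)
    simpa [hpdef] using this
  have hvalx : ∀ a ∈ w1, pyAt nums a < x := by
    intro a ha
    have hne : st.1.reverse.dropWhile p ≠ [] := by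
      intro h; rw [hw1, h] at ha; simp at ha
    have hl0 : (st.1.reverse.dropWhile p).head? = some ((st.1.reverse.dropWhile p).head hne) :=
      List.head?_eq_some_head hne
    set l0 := (st.1.reverse.dropWhile p).head hne with hl0def
    have hpl0 : p l0 = false := by
      have := List.head?_dropWhile_not p st.1.reverse
      rw [hl0] at this
      exact this
    have hl0v : pyAt nums l0 < x := by
      have := of_decide_eq_false (hpdef ▸ hpl0)
      omega
    have hne1 : w1 ≠ [] := by intro h; rw [h] at ha; simp at ha
    have hgl : w1.getLast hne1 = l0 := by
      have h1 : w1.getLast? = some l0 := by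
        rw [hw1, List.getLast?_reverse, hl0]
      have h2 : w1.getLast? = some (w1.getLast hne1) := List.getLast?_eq_some_getLast hne1
      rw [h1] at h2; exact (Option.some_injective _ h2).symm
    have hdecl : w1.dropLast ++ [l0] = w1 := by
      rw [← hgl]; exact List.dropLast_append_getLast hne1
    rcases List.mem_append.mp (by rw [hdecl]; exact ha) with h | h
    · have hpw1' := hpw1
      rw [← hdecl, List.pairwise_append] at hpw1'
      have := (hpw1'.2.2 a h l0 (by simp)).2
      omega
    · have : a = l0 := by simpa using h
      rw [this]; exact hl0v
  obtain ⟨hd, tl, hw2⟩ : ∃ hd tl, w1 ++ [m] = hd :: tl := by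
    cases w1 with
    | nil => exact ⟨m, [], rfl⟩
    | cons a t => exact ⟨a, t ++ [m], rfl⟩
  have hLm : 0 ≤ loA k m ∧ loA k m ≤ m := by
    unfold loA; omega
  have hb2 : ∀ w ∈ hd :: tl, loA k m ≤ w ∧ w ≤ m := by
    rw [← hw2]
    intro w hw
    rcases List.mem_append.mp hw with h | h
    · have := hmem1 w h; omega
    · have : w = m := by simpa using h
      omega
  have hp2 : (hd :: tl).Pairwise (Rwin nums) := by
    rw [← hw2, List.pairwise_append]
    refine ⟨hpw1, by simp, ?_⟩
    intro a ha b hb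
    have : b = m := by simpa using hb
    subst this
    exact ⟨(hmem1 a ha).2, hvalx a ha⟩
  have hc2 : ∀ j : Int, loA k m ≤ j → j ≤ m → ∃ w ∈ hd :: tl, j ≤ w ∧ pyAt nums w ≤ pyAt nums j := by
    intro j hj1 hj2
    rcases eq_or_lt_of_le hj2 with he | hlt
    · exact ⟨m, by rw [← hw2]; simp, by omega, by rw [he]⟩
    · obtain ⟨w, hwmem, hjw, hwv⟩ := hcov j hj1 hlt
      rw [hdec] at hwmem
      rcases List.mem_append.mp hwmem with h | h
      · exact ⟨w, by rw [← hw2]; exact List.mem_append_left _ h, hjw, hwv⟩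
      · exact ⟨m, by rw [← hw2]; simp, by omega, le_trans (hpopped w h) hwv⟩
  rw [hw2]
  by_cases hmk : k ≤ m
  · rw [if_pos (by omega : m ≥ k)]
    have hL' : loA k m = m - k := by unfold loA; omega
    have hL1 : loA k (m + 1) = (m - k) + 1 := by unfold loA; omega
    have hmin : pyAt nums hd = minv nums (m - k) (m + 1) := by
      have := head_min nums (loA k m) m hd tl hb2 hp2 hc2 (by omega) hmn
      rwa [hL'] at this
    have hs1 : st.2.1 + x = sumR nums (m - k) (m + 1) := by
      rw [hsum, hL', hxdef, sumR_succ nums (m - k) m (by omega)]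
    have hpopv := pop_inv nums (loA k m) m hd tl hb2 hp2 hc2
    rw [hL'] at hpopv
    have hhdD : (hd :: tl).headD 0 = hd := rfl
    refine ⟨?_, ?_, ?_, ?_, ?_⟩
    · simp only [hhdD]
      intro w hw
      have := hpopv.1 w hw
      omega
    · simp only [hhdD]
      exact hpopv.2.1
    · simp only [hhdD]
      intro j hj1 hj2
      rw [hL1] at hj1
      exact hpopv.2.2 j (by omega) (by omega)
    · show st.2.1 + x - pyAt nums (m - k) = sumR nums (loA k (m + 1)) (m + 1)
      rw [hs1, hL1, sumR_cons nums (m - k) (m + 1) (by omega)]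
      ring
    · show maxUpd st.2.2 (st.2.1 + x - pyAt nums ((hd :: tl).headD 0)) = bestTo nums k (m + 1)
      rw [hhdD, hmin, hs1, hans, bestTo_succ nums k m hmk]
      unfold fval
      rfl
  · rw [if_neg (by omega : ¬ m ≥ k)]
    have hL0 : loA k m = 0 := by unfold loA; omega
    have hL1 : loA k (m + 1) = 0 := by unfold loA; omega
    refine ⟨?_, hp2, ?_, ?_, ?_⟩
    · intro w hw
      have := hb2 w hw
      omega
    · intro j hj1 hj2
      exact hc2 j (by omega) (by omega)
    · show st.2.1 + x = sumR nums (loA k (m + 1)) (m + 1)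
      rw [hsum, hL0, hxdef, hL1, sumR_succ nums 0 m (by omega)]
    · show st.2.2 = bestTo nums k (m + 1)
      rw [hans, bestTo_stop nums k m (by omega)]

theorem invA_fold (nums : List Int) (k : Int) (hk : 0 ≤ k) :
    ∀ m : Nat, (m : Int) ≤ (nums.length : Int) →
      InvA nums k (m : Int) ((PySem.List.pyRange 0 (m : Int) 1).foldl (stepA nums k) ([], 0, none)) := by
  intro m
  induction m with
  | zero =>
    intro _
    simpa [PySem.List.pyRange_one_eq_nil (le_refl (0:Int))] using invA_zero nums k hk
  | succ m ih =>
    intro hle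
    have hle' : (m : Int) ≤ (nums.length : Int) := by push_cast at hle ⊢; omega
    have hsplit : PySem.List.pyRange 0 ((m : Int) + 1) 1 =
        PySem.List.pyRange 0 (m : Int) 1 ++ [(m : Int)] := by
      rw [PySem.List.pyRange_one_append 0 (m : Int) ((m : Int) + 1) (by omega) (by omega),
          PySem.List.pyRange_one_cons (by omega : (m : Int) < (m : Int) + 1),
          PySem.List.pyRange_one_eq_nil (by omega : (m : Int) + 1 ≤ (m : Int) + 1)]
    have := invA_step nums k (m : Int) hk (by omega) (by push_cast at hle; omega) _ (ih hle')
    push_cast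
    rw [hsplit, List.foldl_append]
    simpa using this

-- B-side: the prefix list
def partials (s : Int) : List Int → List Int
  | [] => []
  | v :: t => (s + v) :: partials (s + v) t

theorem foldl_pre (xs : List Int) : ∀ (acc : List Int) (h : acc ≠ []),
    xs.foldl (fun acc v => acc ++ [pyAt acc (-1) + v]) acc = acc ++ partials (acc.getLast h) xs := by
  induction xs with
  | nil => intro acc h; simp [partials]
  | cons v t ih =>
    intro acc h
    have hlast : pyAt acc (-1) = acc.getLast h := by
      simp [pyAt, PySem.List.pyGet?_neg_one, List.getLast?_eq_some_getLast h]
    simp only [List.foldl_cons, hlast]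
    rw [ih (acc ++ [acc.getLast h + v]) (by simp)]
    simp [partials]

theorem partials_get (xs : List Int) : ∀ (s : Int) (m : Nat), m < xs.length →
    (partials s xs)[m]? = some (s + (xs.take (m + 1)).sum) := by
  induction xs with
  | nil => intro s m h; simp at h
  | cons v t ih =>
    intro s m h
    cases m with
    | zero => simp [partials]
    | succ m =>
      simp only [partials, List.getElem?_cons_succ]
      rw [ih (s + v) m (by simpa using h)]
      simp [List.take_succ_cons]
      ring_nf

theorem take_sum_eq (nums : List Int) (m : Nat) (h : m ≤ nums.length) :
    ((nums.take m).sum) = sumR nums 0 (m : Int) := by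
  have := slice_eq_map nums 0 (m : Int) (by omega) (by omega) (by omega)
  have h2 : PySem.List.slice nums (some 0) (some (m : Int)) = nums.take m := by
    rw [PySem.List.slice_toNat nums (by omega) (by omega)]
    simp
  rw [sumR, ← this, h2]

theorem preAt (nums : List Int) (j : Int) (h0 : 0 ≤ j) (hn : j ≤ (nums.length : Int)) :
    pyAt (nums.foldl (fun acc v => acc ++ [pyAt acc (-1) + v]) [0]) j = sumR nums 0 j := by
  rw [foldl_pre nums [0] (by simp)]
  have hj : j = ((j.toNat : Nat) : Int) := by omega
  rw [hj, pyAt, PySem.List.pyGet?_of_nonneg _ (by omega)]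
  simp only [Int.toNat_natCast]
  cases hmt : j.toNat with
  | zero =>
    simp [sumR, PySem.List.pyRange_one_eq_nil]
  | succ m =>
    have hm : m < nums.length := by omega
    simp only [List.getLast_singleton, List.cons_append, List.nil_append, List.getElem?_cons_succ]
    rw [partials_get nums 0 m hm]
    rw [take_sum_eq nums (m + 1) (by omega)]
    simp

theorem maxB_eq_maxUpd (b : Option Int) (v : Int) :
    (match b with
     | none => some v
     | some b => if v > b then some v else some b) = maxUpd b v := by
  cases b with
  | none => rfl
  | some a =>
    simp only [maxUpd]
    rcases le_or_gt v a with h | h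
    · simp [if_neg (by omega : ¬ v > a), max_eq_left h]
    · simp [if_pos h, max_eq_right (le_of_lt h)]

theorem foldl_ext_mem {α β : Type} (f g : β → α → β) :
    ∀ (l : List α) (b : β), (∀ (b' : β) (a : α), a ∈ l → f b' a = g b' a) →
      l.foldl f b = l.foldl g b := by
  intro l
  induction l with
  | nil => intro b _; rfl
  | cons a t ih =>
    intro b h
    simp only [List.foldl_cons]
    rw [h b a (by simp)]
    exact ih _ (fun b' x hx => h b' x (by simp [hx]))

theorem alt_eq_bestTo (nums : List Int) (k : Int) (hk : 0 ≤ k) (hkn : k < (nums.length : Int)) :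
    max_sum2_alt nums k = (bestTo nums k (nums.length : Int)).getD 0 := by
  have hn : ¬ ((nums.length : Int) ≤ k) := by omega
  simp only [max_sum2_alt]
  rw [if_neg hn]
  unfold bestTo
  refine congrArg (fun o => Option.getD o 0) (foldl_ext_mem _ _ _ _ ?_)
  intro b j hj
  obtain ⟨hj1, hj2⟩ := PySem.List.mem_pyRange_one.mp hj
  have hcur : pyAt (nums.foldl (fun acc v => acc ++ [pyAt acc (-1) + v]) [0]) (j + 1) -
      pyAt (nums.foldl (fun acc v => acc ++ [pyAt acc (-1) + v]) [0]) (j - k) -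
      (PySem.List.min? (PySem.List.slice nums (some (j - k)) (some (j + 1))) (fun x => x)).getD 0
      = fval nums k j := by
    rw [preAt nums (j + 1) (by omega) (by omega), preAt nums (j - k) (by omega) (by omega)]
    have hsp := sumR_split nums 0 (j - k) (j + 1) (by omega) (by omega)
    unfold fval minv
    omega
  rw [hcur]
  exact maxB_eq_maxUpd b (fval nums k j)

-- ===== VERDICT (by name: the statement is the Claim_ definition above) =====
theorem max_sum2_spec : Claim_equal_max_sum2 := by
  intro nums k _ hk
  unfold Spec_max_sum2
  by_cases hnk : (nums.length : Int) ≤ k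
  · rw [max_sum2_eq, if_pos hnk]
    simp only [max_sum2_alt]
    rw [if_pos hnk]
  · have hkn : k < (nums.length : Int) := by omega
    rw [max_sum2_eq, if_neg hnk, alt_eq_bestTo nums k hk hkn]
    have := invA_fold nums k hk nums.length (by omega)
    exact congrArg (Option.getD · 0) this.2.2.2.2
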